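-- pv_equiv track=rewrite | github.com/wojciechGaudnik/CodeWars | Python/kyu7PowersOf3.py | largest_power
-- ===== SOURCE A (Python) =====
-- def largest_power(N):
--     if N <= 1:
--         return -1
--     last_k = 0
--     current_k = 0
--     while 3 ** current_k < N:
--         last_k = current_k
--         current_k += 1
--     return last_k
-- ===== SOURCE B (Python) =====
-- def largest_power(N):
--     if N <= 1:
--         return -1
--     hi = 1
--     while 3 ** hi < N:
--         hi *= 2
--     lo = hi // 2
--     while hi - lo > 1:
--         mid = (lo + hi) // 2
--         if 3 ** mid < N:
--             lo = mid
--         else: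
--             hi = mid
--     return lo
-- ===== Notes on version B (the rewrite author's own statement) =====
-- stated objective: faster
-- what changed: Replaced the linear scan that increments the exponent one by one with exponential search (doubling the upper bracket) followed by binary search on the exponent, still comparing the power directly against N.
import Mathlib
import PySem

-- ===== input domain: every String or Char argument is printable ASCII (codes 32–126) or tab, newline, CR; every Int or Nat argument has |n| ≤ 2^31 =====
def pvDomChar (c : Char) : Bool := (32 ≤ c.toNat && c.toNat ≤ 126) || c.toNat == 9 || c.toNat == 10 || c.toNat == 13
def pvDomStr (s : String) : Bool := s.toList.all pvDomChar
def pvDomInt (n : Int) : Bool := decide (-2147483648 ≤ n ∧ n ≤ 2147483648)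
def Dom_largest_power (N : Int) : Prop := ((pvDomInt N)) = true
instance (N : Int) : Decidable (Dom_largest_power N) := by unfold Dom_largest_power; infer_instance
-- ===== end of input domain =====

-- B replaces A's one-by-one exponent scan with exponential search plus binary search on the exponent (fewer loop iterations).


-- ===== PORT A =====
-- A's while loop as structural recursion on a fuel argument; fuel N.toNat is proved
-- sufficient below (the loop exits once 3^current_k ≥ N, and 3^k ≥ k+1).
def lpA (fuel : Nat) (N : Int) (last_k current_k : Nat) : Nat :=
  match fuel with
  | 0 => last_k
  | f + 1 => if (3:Int) ^ current_k < N then lpA f N current_k (current_k + 1) else last_k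

def largest_power (N : Int) : Int :=
  if N ≤ 1 then -1 else (lpA N.toNat N 0 0 : Int)

-- ===== PORT B =====
-- exponential search: double hi until 3^hi ≥ N
def lpExp (fuel : Nat) (N : Int) (hi : Nat) : Nat :=
  match fuel with
  | 0 => hi
  | f + 1 => if (3:Int) ^ hi < N then lpExp f N (hi * 2) else hi

-- binary search for the largest k with 3^k < N, invariant 3^lo < N ≤ 3^hi
def lpBin (fuel : Nat) (N : Int) (lo hi : Nat) : Nat :=
  match fuel with
  | 0 => lo
  | f + 1 =>
    if hi - lo > 1 then
      if (3:Int) ^ ((lo + hi) / 2) < N then lpBin f N ((lo + hi) / 2) hi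
      else lpBin f N lo ((lo + hi) / 2)
    else lo

def largest_power_alt (N : Int) : Int :=
  if N ≤ 1 then -1
  else
    let hi := lpExp N.toNat N 1
    let lo := hi / 2
    (lpBin hi N lo hi : Int)

-- ===== PRECONDITION & SPEC =====
def Spec_largest_power (N : Int) (out : Int) : Prop := out = largest_power_alt N
instance (N : Int) (out : Int) : Decidable (Spec_largest_power N out) := by unfold Spec_largest_power; infer_instance

-- ===== CLAIM (what is proved, stated in full; the proofs are below) =====
def Claim_equal_largest_power : Prop := ∀ (N : Int), Dom_largest_power N → Spec_largest_power N (largest_power N)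

-- ===== LEMMAS AND PROOFS =====

-- 3^n ≥ n+1 over Int
lemma three_pow_ge (n : Nat) : (n : Int) + 1 ≤ 3 ^ n := by
  induction n with
  | zero => norm_num
  | succ k ih =>
    have h3 : (0:Int) < 3 ^ k := by positivity
    push_cast
    calc (k : Int) + 1 + 1 ≤ 3 * ((k : Int) + 1) := by linarith
      _ ≤ 3 * 3 ^ k := by linarith
      _ = 3 ^ (k + 1) := by ring

lemma three_pow_mono {a b : Nat} (h : a ≤ b) : (3:Int) ^ a ≤ 3 ^ b := by
  exact pow_le_pow_right₀ (by norm_num) h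

-- the post-condition both loops establish
def Post (N : Int) (r : Nat) : Prop := (3:Int) ^ r < N ∧ N ≤ 3 ^ (r + 1)

lemma Post_unique {N : Int} {a b : Nat} (ha : Post N a) (hb : Post N b) : a = b := by
  rcases lt_trichotomy a b with h | h | h
  · exfalso
    have := three_pow_mono (show a + 1 ≤ b by omega)
    exact absurd (lt_of_le_of_lt (ha.2.trans this) hb.1) (lt_irrefl N)
  · exact h
  · exfalso
    have := three_pow_mono (show b + 1 ≤ a by omega)
    exact absurd (lt_of_le_of_lt (hb.2.trans this) ha.1) (lt_irrefl N)

-- A's loop: with invariant cur = last+1 and 3^last < N, and enough fuel, the result satisfies Post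
lemma lpA_post (N : Int) : ∀ (f last : Nat), (3:Int) ^ last < N → N ≤ 3 ^ (last + f + 1) →
    Post N (lpA f N last (last + 1)) := by
  intro f
  induction f with
  | zero => intro last h1 h2; exact ⟨h1, by simpa using h2⟩
  | succ g ih =>
    intro last h1 h2
    rw [lpA]
    split
    · next hc =>
      have := ih (last + 1) hc (by rw [show last + 1 + g + 1 = last + (g+1) + 1 by omega]; exact h2)
      simpa using this
    · next hc => exact ⟨h1, le_of_not_gt (by simpa [Nat.add_comm] using hc)⟩

lemma largest_power_post {N : Int} (h2 : 2 ≤ N) : Post N (lpA N.toNat N 0 0) := by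
  have hN0 : (0:Int) ≤ N := by linarith
  have hNt : (N.toNat : Int) = N := Int.toNat_of_nonneg hN0
  have hge2 : 2 ≤ N.toNat := by omega
  obtain ⟨f, hf⟩ : ∃ f, N.toNat = f + 1 := ⟨N.toNat - 1, by omega⟩
  rw [hf, lpA]
  have h0 : (3:Int) ^ (0:Nat) < N := by norm_num; linarith
  rw [if_pos h0]
  have hfuel : N ≤ 3 ^ (0 + f + 1) := by
    have := three_pow_ge (0 + f + 1)
    have : ((0 + f + 1 : Nat) : Int) + 1 ≤ 3 ^ (0 + f + 1) := this
    have hN : N ≤ ((0 + f + 1 : Nat) : Int) + 1 := by push_cast; omega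
    linarith
  exact lpA_post N f 0 h0 hfuel

-- B's exponential search: result h satisfies 3^(h/2) < N ≤ 3^h and 1 ≤ h
lemma lpExp_post (N : Int) : ∀ (f hi : Nat), 1 ≤ hi → (3:Int) ^ (hi / 2) < N → N ≤ 3 ^ (hi * 2 ^ f) →
    1 ≤ lpExp f N hi ∧ (3:Int) ^ (lpExp f N hi / 2) < N ∧ N ≤ 3 ^ (lpExp f N hi) := by
  intro f
  induction f with
  | zero => intro hi h1 h2 h3; exact ⟨h1, h2, by simpa using h3⟩
  | succ g ih =>
    intro hi h1 h2 h3
    rw [lpExp]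
    split
    · next hc =>
      refine ih (hi * 2) (by omega) ?_ ?_
      · simpa [Nat.mul_div_cancel] using hc
      · rw [show hi * 2 * 2 ^ g = hi * 2 ^ (g + 1) by ring]; exact h3
    · next hc => exact ⟨h1, h2, le_of_not_gt hc⟩

-- B's binary search maintains 3^lo < N ≤ 3^hi and shrinks hi - lo
lemma lpBin_post (N : Int) : ∀ (f lo hi : Nat), (3:Int) ^ lo < N → N ≤ 3 ^ hi → lo < hi →
    hi - lo ≤ f + 1 → Post N (lpBin f N lo hi) := by
  intro f
  induction f with
  | zero =>
    intro lo hi h1 h2 h3 h4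
    have : hi = lo + 1 := by omega
    exact ⟨h1, this ▸ h2⟩
  | succ g ih =>
    intro lo hi h1 h2 h3 h4
    rw [lpBin]
    split
    · next hgt =>
      have hmidlo : lo < (lo + hi) / 2 := by omega
      have hmidhi : (lo + hi) / 2 < hi := by omega
      split
      · next hc => exact ih ((lo + hi) / 2) hi hc h2 hmidhi (by omega)
      · next hc => exact ih lo ((lo + hi) / 2) h1 (le_of_not_gt hc) hmidlo (by omega)
    · next hle =>
      have : hi = lo + 1 := by omega
      exact ⟨h1, this ▸ h2⟩

lemma largest_power_alt_post {N : Int} (h2 : 2 ≤ N) :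
    Post N (lpBin (lpExp N.toNat N 1) N (lpExp N.toNat N 1 / 2) (lpExp N.toNat N 1)) := by
  have hN0 : (0:Int) ≤ N := by linarith
  have hge2 : 2 ≤ N.toNat := by omega
  have h0 : (3:Int) ^ ((1:Nat) / 2) < N := by norm_num; linarith
  have hfuel : N ≤ 3 ^ (1 * 2 ^ N.toNat) := by
    have hp : N.toNat < 2 ^ N.toNat := Nat.lt_two_pow_self
    have h1 : ((1 * 2 ^ N.toNat : Nat) : Int) + 1 ≤ 3 ^ (1 * 2 ^ N.toNat) := three_pow_ge _
    have hN : N ≤ ((1 * 2 ^ N.toNat : Nat) : Int) + 1 := by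
      have hNt : (N.toNat : Int) = N := Int.toNat_of_nonneg hN0
      have hp' : (N.toNat : Int) < ((2 ^ N.toNat : Nat) : Int) := by exact_mod_cast hp
      push_cast
      push_cast at hp'
      linarith
    linarith
  obtain ⟨hhi1, hhilt, hhige⟩ := lpExp_post N N.toNat 1 (le_refl 1) h0 hfuel
  exact lpBin_post N (lpExp N.toNat N 1) (lpExp N.toNat N 1 / 2) (lpExp N.toNat N 1)
    hhilt hhige (by omega) (by omega)

-- ===== VERDICT (by name: the statement is the Claim_ definition above) =====
theorem largest_power_spec : Claim_equal_largest_power := by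
  intro N _
  unfold Spec_largest_power largest_power largest_power_alt
  split
  · rfl
  · next h =>
    have h2 : 2 ≤ N := by omega
    have hA := largest_power_post h2
    have hB := largest_power_alt_post h2
    simp only []
    exact congrArg _ (Post_unique hA hB)
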